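/- GENERATED by farm/mkstatement.py from design/units.split.tsv — do not edit.
   THE SPLIT of the proof unit `stb_vorbis_get_frame_float` into `stb_vorbis_get_frame_float.1`, `stb_vorbis_get_frame_float.2`, `stb_vorbis_get_frame_float.3`, `stb_vorbis_get_frame_float.4`, `stb_vorbis_get_frame_float.5`, `stb_vorbis_get_frame_float.6`, `stb_vorbis_get_frame_float.COMPOSITION`: the children's statements give the parent's
   UNCHANGED statement (so nothing above the parent — callers, compositions — is touched by the split). -/
import Vorbis.Spec.Units.stb_vorbis_get_frame_float
import Vorbis.Spec.Units.stb_vorbis_get_frame_float_1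
import Vorbis.Spec.Units.stb_vorbis_get_frame_float_2
import Vorbis.Spec.Units.stb_vorbis_get_frame_float_3
import Vorbis.Spec.Units.stb_vorbis_get_frame_float_4
import Vorbis.Spec.Units.stb_vorbis_get_frame_float_5
import Vorbis.Spec.Units.stb_vorbis_get_frame_float_6
import Vorbis.Spec.Units.stb_vorbis_get_frame_float_COMPOSITION
namespace Vorbis.Spec.Splits
open X86 X86.User Asan

/-- The segments of the split function `stb_vorbis_get_frame_float` and their composition prove its contract. -/
theorem stb_vorbis_get_frame_float
    (h_stb_vorbis_get_frame_float_1 : Vorbis.Spec.stb_vorbis_get_frame_float_1.Statement)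
    (h_stb_vorbis_get_frame_float_2 : Vorbis.Spec.stb_vorbis_get_frame_float_2.Statement)
    (h_stb_vorbis_get_frame_float_3 : Vorbis.Spec.stb_vorbis_get_frame_float_3.Statement)
    (h_stb_vorbis_get_frame_float_4 : Vorbis.Spec.stb_vorbis_get_frame_float_4.Statement)
    (h_stb_vorbis_get_frame_float_5 : Vorbis.Spec.stb_vorbis_get_frame_float_5.Statement)
    (h_stb_vorbis_get_frame_float_6 : Vorbis.Spec.stb_vorbis_get_frame_float_6.Statement)
    (h_stb_vorbis_get_frame_float_COMPOSITION : Vorbis.Spec.stb_vorbis_get_frame_float_COMPOSITION.Statement) :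
    Vorbis.Spec.stb_vorbis_get_frame_float.Statement := by
  intro Lay _hLay μ _hμ u₀ _hcode _h_vorbis_decode_packet _h_asan_store4_noabort _h_vorbis_finish_frame _h_asan_load8_noabort _h_asan_store8_noabort _h_asan_load4_noabort
  exact h_stb_vorbis_get_frame_float_COMPOSITION Lay _hLay μ _hμ u₀
    (h_stb_vorbis_get_frame_float_1 Lay _hLay μ _hμ u₀ _hcode _h_vorbis_decode_packet)
    (h_stb_vorbis_get_frame_float_2 Lay _hLay μ _hμ u₀ _hcode _h_asan_store4_noabort _h_vorbis_finish_frame)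
    (h_stb_vorbis_get_frame_float_3 Lay _hLay μ _hμ u₀ _hcode)
    (h_stb_vorbis_get_frame_float_4 Lay _hLay μ _hμ u₀ _hcode _h_asan_load8_noabort _h_asan_store8_noabort _h_asan_load4_noabort)
    (h_stb_vorbis_get_frame_float_5 Lay _hLay μ _hμ u₀ _hcode _h_asan_store4_noabort _h_asan_store8_noabort)
    (h_stb_vorbis_get_frame_float_6 Lay _hLay μ _hμ u₀ _hcode)

end Vorbis.Spec.Splits
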